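-- pv_equiv track=rewrite | github.com/RemiErr/2026-python | weeks/week-07/solutions/1111405012/question-10170-su.py | solve
-- ===== SOURCE A (Python) =====
-- import math
--
-- def people_on_day(s: int, d: int) -> int:
--     target = (s - 1) * s + 2 * d
--     n = (math.isqrt(1 + 4 * target) - 1) // 2
--     if n < s:
--         n = s
--     while n * (n + 1) < target:
--         n += 1
--     return n
--
-- def solve(data: str) -> str:
--     parts = data.split()
--     if not parts:
--         return ""
--     answer: list[str] = []
--     for i in range(0, len(parts), 2):
--         answer.append(str(people_on_day(int(parts[i]), int(parts[i + 1]))))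
--     return "\n".join(answer)
-- ===== SOURCE B (Python) =====
-- def people_on_day(s: int, d: int) -> int:
--     target = (s - 1) * s + 2 * d
--     if target < 0:
--         raise ValueError("negative day threshold")
--     lo, hi = 0, target + 1
--     while lo < hi:
--         mid = (lo + hi) // 2
--         if mid * (mid + 1) >= target:
--             hi = mid
--         else:
--             lo = mid + 1
--     return max(s, lo)
--
-- def solve(data: str) -> str:
--     parts = data.split()
--     it = iter(parts)
--     return "\n".join(str(people_on_day(int(s), int(d))) for s, d in zip(it, it, strict=True))
-- ===== Notes on version B (the rewrite author's own statement) =====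
-- stated objective: alternative
-- what changed: people_on_day finds the smallest n with n*(n+1) >= target by binary search instead of an isqrt closed form plus a correction loop (raising ValueError on a negative target just as A's math.isqrt does), and solve pairs the tokens with a strict zip over one iterator instead of indexing an even/odd range.
import Mathlib
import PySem

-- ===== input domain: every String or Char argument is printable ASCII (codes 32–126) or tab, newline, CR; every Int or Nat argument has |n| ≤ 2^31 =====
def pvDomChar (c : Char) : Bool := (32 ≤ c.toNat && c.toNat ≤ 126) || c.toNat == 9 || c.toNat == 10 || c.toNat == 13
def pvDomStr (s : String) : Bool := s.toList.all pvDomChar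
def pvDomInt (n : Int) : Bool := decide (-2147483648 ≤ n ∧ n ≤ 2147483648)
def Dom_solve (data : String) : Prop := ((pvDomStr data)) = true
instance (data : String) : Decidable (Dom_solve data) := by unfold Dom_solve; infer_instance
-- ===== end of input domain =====

-- B replaces the isqrt closed form + correction loop by a binary search for the least n with
-- n*(n+1) ≥ target (raising on a negative target just as A's math.isqrt does), and pairs
-- tokens directly instead of indexing an even/odd range (alternative).

-- ===== PORT A =====

-- math.isqrt x: exact for 0 ≤ x; Python raises ValueError for x < 0 (excluded by Pre_solve)
def isqrtA (x : Int) : Int := ((x.toNat.sqrt : Nat) : Int)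

-- 'while n * (n + 1) < target: n += 1'
def whileA (target n : Int) : Int :=
  if n * (n + 1) < target then whileA target (n + 1) else n
termination_by (target - n).toNat
decreasing_by
  rename_i h
  have hn : n ≤ n * (n + 1) := by nlinarith [sq_nonneg n]
  omega

def people_on_day (s d : Int) : Int :=
  let target := (s - 1) * s + 2 * d
  let n := PySem.Int.floordiv (isqrtA (1 + 4 * target) - 1) 2
  let n := if n < s then s else n
  whileA target n

def solve (data : String) : String :=
  let parts := PySem.Str.split₀ data
  if parts = [] then ""
  else
    let answer := (PySem.List.pyRange 0 (parts.length : Int) 2).foldl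
      (fun acc i =>
        acc ++ [PySem.Int.toStr (people_on_day
          ((PySem.Int.ofStr? (PySem.List.pyGetD parts i "")).getD 0)
          ((PySem.Int.ofStr? (PySem.List.pyGetD parts (i + 1) "")).getD 0))]) []
    PySem.Str.join "\n" answer

-- ===== PORT B =====

-- 'zip(it, it, strict=True)' pairing of the token list: exact on even-length lists;
-- on an odd count Python B raises ValueError (outside Pre_solve, where nothing is claimed)
def pairUp : List String → List (String × String)
  | a :: b :: rest => (a, b) :: pairUp rest
  | _ => []

-- binary search: smallest n in [lo, hi] with n*(n+1) >= target (hi assumed to qualify)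
def bsearchB (target lo hi : Int) : Int :=
  if h : lo < hi then
    let mid := PySem.Int.floordiv (lo + hi) 2
    if target ≤ mid * (mid + 1) then bsearchB target lo mid else bsearchB target (mid + 1) hi
  else lo
termination_by (hi - lo).toNat
decreasing_by
  · have hmlt : PySem.Int.floordiv (lo + hi) 2 < hi := by
      rw [PySem.Int.floordiv_lt_iff_lt_mul (by omega)]; omega
    omega
  · have hb := PySem.Int.floordiv_two_mid_bounds (le_of_lt h)
    omega

-- Source B raises ValueError when target < 0 (outside Pre_solve, where nothing is claimed)
def people_on_day_alt (s d : Int) : Int :=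
  let target := (s - 1) * s + 2 * d
  max s (bsearchB target 0 (target + 1))

def solve_alt (data : String) : String :=
  PySem.Str.join "\n"
    ((pairUp (PySem.Str.split₀ data)).map
      (fun p => PySem.Int.toStr (people_on_day_alt
        ((PySem.Int.ofStr? p.1).getD 0) ((PySem.Int.ofStr? p.2).getD 0))))

-- ===== PRECONDITION & SPEC =====

-- both tokens of a pair parse as Python ints and the pair's target is nonnegative
def pairPre (p : String × String) : Prop :=
  (PySem.Int.ofStr? p.1).isSome ∧ (PySem.Int.ofStr? p.2).isSome ∧
    0 ≤ ((PySem.Int.ofStr? p.1).getD 0 - 1) * (PySem.Int.ofStr? p.1).getD 0 +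
      2 * (PySem.Int.ofStr? p.2).getD 0

-- exactly the inputs where A returns: an even number of tokens (else IndexError), every token an
-- int literal (else ValueError), and every pair's target nonnegative (else math.isqrt ValueError)
def Pre_solve (data : String) : Prop :=
  (PySem.Str.split₀ data).length % 2 = 0 ∧
    ∀ k < (PySem.Str.split₀ data).length, k % 2 = 0 →
      pairPre ((PySem.Str.split₀ data).getD k "", (PySem.Str.split₀ data).getD (k + 1) "")

instance (data : String) : Decidable (Pre_solve data) := by unfold Pre_solve pairPre; infer_instance

def pvWitness_solve : String := "1 5"

def Spec_solve (data : String) (out : String) : Prop := out = solve_alt data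
instance (data : String) (out : String) : Decidable (Spec_solve data out) := by unfold Spec_solve; infer_instance

-- ===== CLAIM (what is proved, stated in full; the proofs are below) =====
def Claim_equal_solve : Prop := ∀ (data : String), Dom_solve data → Pre_solve data → Spec_solve data (solve data)

-- ===== LEMMAS AND PROOFS =====

lemma mem_pairUp (ps : List String) (p : String × String) (hp : p ∈ pairUp ps) :
    ∃ k : Nat, k < ps.length ∧ k % 2 = 0 ∧
      p.1 = ps.getD k "" ∧ p.2 = ps.getD (k + 1) "" := by
  induction ps using pairUp.induct with
  | case1 x y rest ih =>
    rw [show pairUp (x :: y :: rest) = (x, y) :: pairUp rest from rfl] at hp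
    rcases List.mem_cons.mp hp with rfl | hmem
    · exact ⟨0, by simp, by omega, by simp, by simp⟩
    · obtain ⟨k, hk, hke, h1, h2⟩ := ih hmem
      refine ⟨k + 2, by simp; omega, by omega, ?_, ?_⟩
      · simpa [List.getD_cons_succ] using h1
      · simpa [List.getD_cons_succ] using h2
  | case2 ps h =>
    match ps, h with
    | [], _ => simp [show pairUp ([] : List String) = [] from rfl] at hp
    | [x], _ => simp [show pairUp [x] = [] from rfl] at hp
    | a :: b :: rest, h => exact (h a b rest rfl).elim

lemma mono_prod {a b : Int} (h0 : 0 ≤ a) (h : a < b) : a * (a + 1) < b * (b + 1) := by nlinarith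

lemma mono_prod_le {a b : Int} (h0 : 0 ≤ a) (h : a ≤ b) : a * (a + 1) ≤ b * (b + 1) := by nlinarith

-- whileA returns the least m ≥ n with m*(m+1) ≥ target
lemma whileA_spec (target n : Int) :
    n ≤ whileA target n ∧ target ≤ whileA target n * (whileA target n + 1) ∧
      ∀ m, n ≤ m → m < whileA target n → m * (m + 1) < target := by
  fun_induction whileA target n with
  | case1 n h ih =>
    refine ⟨by omega, ih.2.1, fun m hm1 hm2 => ?_⟩
    rcases eq_or_lt_of_le hm1 with rfl | hlt
    · exact h
    · exact ih.2.2 m (by omega) hm2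
  | case2 n h => exact ⟨le_refl _, by omega, fun m hm1 hm2 => by omega⟩

-- bsearchB returns the least m ≥ lo with m*(m+1) ≥ target, provided hi qualifies
lemma bsearchB_spec (target lo hi : Int) (hlo : 0 ≤ lo) (hlh : lo ≤ hi)
    (hhi : target ≤ hi * (hi + 1)) :
    lo ≤ bsearchB target lo hi ∧ bsearchB target lo hi ≤ hi ∧
      target ≤ bsearchB target lo hi * (bsearchB target lo hi + 1) ∧
      ∀ m, lo ≤ m → m < bsearchB target lo hi → m * (m + 1) < target := by
  fun_induction bsearchB target lo hi with
  | case1 lo hi h mid hc ih =>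
    have hb : lo ≤ mid ∧ mid ≤ hi := PySem.Int.floordiv_two_mid_bounds (le_of_lt h)
    have ih' := ih hlo hb.1 hc
    exact ⟨ih'.1, le_trans ih'.2.1 hb.2, ih'.2.2⟩
  | case2 lo hi h mid hc ih =>
    have hb : lo ≤ mid ∧ mid ≤ hi := PySem.Int.floordiv_two_mid_bounds (le_of_lt h)
    have hmlt : mid < hi := by
      have : PySem.Int.floordiv (lo + hi) 2 < hi := by
        rw [PySem.Int.floordiv_lt_iff_lt_mul (by omega : (0:Int) < 2)]; omega
      exact this
    have ih' := ih (le_trans hlo (le_trans hb.1 (Int.le_add_one (le_refl mid))))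
      (by exact Int.add_one_le_iff.mpr hmlt) hhi
    have hmidt : mid * (mid + 1) < target := not_le.mp hc
    refine ⟨le_trans hb.1 (le_trans (Int.le_add_one (le_refl mid)) ih'.1), ih'.2.1, ih'.2.2.1,
      fun m hm1 hm2 => ?_⟩
    by_cases hcase : mid + 1 ≤ m
    · exact ih'.2.2.2 m hcase hm2
    · have hmle : m ≤ mid := Int.lt_add_one_iff.mp (not_le.mp hcase)
      exact lt_of_le_of_lt (mono_prod_le (le_trans hlo hm1) hmle) hmidt
  | case3 lo hi h =>
    have heq : lo = hi := le_antisymm hlh (not_lt.mp h)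
    subst heq
    exact ⟨le_refl _, le_refl _, hhi, fun m hm1 hm2 => absurd (lt_of_le_of_lt hm1 hm2) (lt_irrefl _)⟩

lemma startA_bounds (target : Int) (ht : 0 ≤ target) :
    0 ≤ PySem.Int.floordiv (isqrtA (1 + 4 * target) - 1) 2 ∧
      PySem.Int.floordiv (isqrtA (1 + 4 * target) - 1) 2 *
        (PySem.Int.floordiv (isqrtA (1 + 4 * target) - 1) 2 + 1) ≤ target := by
  set x : Nat := (1 + 4 * target).toNat with hx
  have hxval : (x : Int) = 1 + 4 * target := by omega
  have hq1 : ((Nat.sqrt x : Nat) : Int) * (Nat.sqrt x : Nat) ≤ (x : Int) := by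
    exact_mod_cast (by simpa [pow_two] using Nat.sqrt_le' x : Nat.sqrt x * Nat.sqrt x ≤ x)
  have hq0 : 1 ≤ ((Nat.sqrt x : Nat) : Int) := by
    have h1 : 1 ≤ x := by omega
    have := Nat.sqrt_le_sqrt h1
    simp [Nat.sqrt_one] at this
    exact_mod_cast this
  have hA : isqrtA (1 + 4 * target) = ((Nat.sqrt x : Nat) : Int) := rfl
  set q : Int := ((Nat.sqrt x : Nat) : Int) with hqdef
  set n0 : Int := PySem.Int.floordiv (isqrtA (1 + 4 * target) - 1) 2 with hn0
  have hfd : n0 * 2 ≤ q - 1 ∧ q - 1 < (n0 + 1) * 2 := by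
    have := (PySem.Int.floordiv_eq_iff_of_pos (a := q - 1) (b := 2) (q := n0) (by omega)).mp ?_
    · exact this
    · rw [hn0, hA]
  constructor
  · omega
  · nlinarith [hfd.1, hq1, hxval]

-- A's clamped correction loop and B's clamped least solution coincide
lemma least_eq (t s n0 rB : Int) (hn0pos : 0 ≤ n0) (hn0le : n0 * (n0 + 1) ≤ t)
    (hrB0 : 0 ≤ rB) (hrBq : t ≤ rB * (rB + 1))
    (hrBmin : ∀ m, 0 ≤ m → m < rB → m * (m + 1) < t) :
    whileA t (if n0 < s then s else n0) = max s rB := by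
  have hn0rB : n0 ≤ rB := by
    by_contra hcon
    rw [not_le] at hcon
    have := mono_prod hrB0 hcon
    omega
  set a : Int := if n0 < s then s else n0 with ha
  obtain ⟨harA, hrAq, hrAmin⟩ := whileA_spec t a
  set rA : Int := whileA t a with hrA
  have ha0 : 0 ≤ a := by rw [ha]; split <;> omega
  by_cases hs : s ≤ rB
  · have haB : a ≤ rB := by rw [ha]; split <;> omega
    have h1 : ¬ rA < rB := fun hlt => absurd (hrBmin rA (by omega) hlt) (by omega)
    have h2 : ¬ rB < rA := fun hlt => absurd (hrAmin rB haB hlt) (by omega)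
    rw [max_eq_right hs]; omega
  · rw [not_le] at hs
    have hsq : t ≤ s * (s + 1) := le_trans hrBq (mono_prod_le hrB0 (by omega))
    have has : a = s := by rw [ha]; split <;> omega
    have : ¬ s < rA := fun hlt => absurd (hrAmin s (by omega) hlt) (by omega)
    rw [max_eq_left (by omega)]; omega

-- people_on_day agrees with the binary-search version whenever target ≥ 0
lemma people_eq (s d : Int) (ht : 0 ≤ (s - 1) * s + 2 * d) :
    people_on_day s d = people_on_day_alt s d := by
  simp only [people_on_day, people_on_day_alt]
  set t : Int := (s - 1) * s + 2 * d with htdef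
  obtain ⟨hn0pos, hn0le⟩ := startA_bounds t ht
  have hhiq : t ≤ (t + 1) * ((t + 1) + 1) := by nlinarith
  obtain ⟨hrB0, _, hrBq, hrBmin⟩ := bsearchB_spec t 0 (t + 1) (le_refl 0) (by omega) hhiq
  exact least_eq t s _ _ hn0pos hn0le hrB0 hrBq hrBmin

lemma pyGetD_cons_add_one (x : String) (xs : List String) (i : Int) (hi : 0 ≤ i) (d : String) :
    PySem.List.pyGetD (x :: xs) (i + 1) d = PySem.List.pyGetD xs i d := by
  obtain ⟨n, rfl⟩ := Int.eq_ofNat_of_zero_le hi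
  have h1 : ((n : Int) + 1) = ((n + 1 : Nat) : Int) := by push_cast; ring
  rw [h1, PySem.List.pyGetD_natCast, PySem.List.pyGetD_natCast]
  simp

lemma pyRange_two_cons (a b : Int) (h : a < b) :
    PySem.List.pyRange a b 2 = a :: PySem.List.pyRange (a + 2) b 2 := by
  rw [PySem.List.pyRange_of_pos a b (by omega), PySem.List.pyRange_of_pos (a + 2) b (by omega)]
  have h1 : (if a < b then ((b - a + 2 - 1) / 2).toNat else 0) =
      (if a + 2 < b then ((b - (a + 2) + 2 - 1) / 2).toNat else 0) + 1 := by
    by_cases h2 : a + 2 < b <;> simp only [h, h2, if_true, if_false] <;> omega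
  rw [h1, List.range_succ_eq_map]
  simp only [List.map_cons, List.map_map]
  refine List.cons_eq_cons.mpr ⟨by norm_num, ?_⟩
  apply List.map_congr_left
  intro k _
  simp [Function.comp]
  ring

-- the step-2 index loop of A equals the map over explicit pairs, for any per-pair function g
lemma loopA_eq (g : String → String → String) :
    ∀ (ps : List String), ps.length % 2 = 0 → ∀ (acc : List String),
    (PySem.List.pyRange 0 (ps.length : Int) 2).foldl
        (fun acc i => acc ++ [g (PySem.List.pyGetD ps i "") (PySem.List.pyGetD ps (i + 1) "")]) acc
      = acc ++ (pairUp ps).map (fun p => g p.1 p.2) := by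
  intro ps
  induction ps using pairUp.induct with
  | case1 x y rest ih =>
    intro hev acc
    have hev' : rest.length % 2 = 0 := by simp at hev ⊢; omega
    have hlen : ((x :: y :: rest).length : Int) = (rest.length : Int) + 2 := by simp; ring
    rw [hlen, pyRange_two_cons 0 _ (by positivity)]
    have hshift : PySem.List.pyRange (0 + 2) ((rest.length : Int) + 2) 2
        = (PySem.List.pyRange 0 (rest.length : Int) 2).map (· + 2) := by
      rw [PySem.List.pyRange_of_pos, PySem.List.pyRange_of_pos]
      · simp only [List.map_map]
        have : (if (0:Int) + 2 < (rest.length : Int) + 2 then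
            (((rest.length : Int) + 2 - (0 + 2) + 2 - 1) / 2).toNat else 0)
            = (if (0:Int) < (rest.length : Int) then (((rest.length : Int) - 0 + 2 - 1) / 2).toNat else 0) := by
          by_cases h2 : (0:Int) < (rest.length : Int) <;> simp [h2] <;> omega
        rw [this]
        apply List.map_congr_left
        intro k _
        simp [Function.comp]; ring
      · omega
      · omega
    rw [hshift]
    simp only [List.foldl_cons, List.foldl_map]
    have hbody0 : PySem.List.pyGetD (x :: y :: rest) 0 "" = x := by
      simp [PySem.List.pyGetD_zero_cons]
    have hbody1 : PySem.List.pyGetD (x :: y :: rest) (0 + 1) "" = y := by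
      rw [pyGetD_cons_add_one x _ 0 (by omega)]
      simp [PySem.List.pyGetD_zero_cons]
    rw [hbody0, hbody1]
    have hcong : ∀ (acc' : List String),
        (PySem.List.pyRange 0 (rest.length : Int) 2).foldl
          (fun acc i => acc ++ [g (PySem.List.pyGetD (x :: y :: rest) (i + 2) "")
              (PySem.List.pyGetD (x :: y :: rest) (i + 2 + 1) "")]) acc'
        = (PySem.List.pyRange 0 (rest.length : Int) 2).foldl
          (fun acc i => acc ++ [g (PySem.List.pyGetD rest i "") (PySem.List.pyGetD rest (i + 1) "")]) acc' := by
      intro acc'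
      apply PySem.List.foldl_congr_mem
      intro b i hi
      have hipos : 0 ≤ i := by
        have := (PySem.List.mem_pyRange_iff_of_pos (by omega : (0:Int) < 2) i).mp hi
        omega
      have e1 : i + 2 = (i + 1) + 1 := by ring
      rw [e1,
        pyGetD_cons_add_one x _ (i + 1) (by omega), pyGetD_cons_add_one y _ i (by omega),
        pyGetD_cons_add_one x _ ((i + 1) + 1) (by omega), pyGetD_cons_add_one y _ (i + 1) (by omega)]
    rw [hcong, ih hev' (acc ++ [g x y])]
    simp [pairUp]
  | case2 ps h =>
    intro hev acc
    match ps, h with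
    | [], _ =>
      simp [PySem.List.pyRange_of_pos 0 0 (by omega : (0:Int) < 2),
        show pairUp [] = [] from rfl]
    | [x], _ => simp at hev
    | a :: b :: rest, h => exact (h a b rest rfl).elim

-- ===== VERDICT (by name: the statement is the Claim_ definition above) =====
theorem solve_spec : Claim_equal_solve := by
  intro data _ hpre
  obtain ⟨hev, hpairs⟩ := hpre
  unfold Spec_solve solve solve_alt
  set parts := PySem.Str.split₀ data with hp
  by_cases hnil : parts = []
  · simp [hnil, pairUp, PySem.Str.join]
  · simp only [hnil, reduceIte]
    have hrw := loopA_eq (fun s d => PySem.Int.toStr (people_on_day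
        ((PySem.Int.ofStr? s).getD 0) ((PySem.Int.ofStr? d).getD 0))) parts hev []
    simp only [] at hrw
    rw [hrw]
    simp only [List.nil_append]
    congr 1
    apply List.map_congr_left
    intro p hp
    obtain ⟨k, hk, hke, hp1, hp2⟩ := mem_pairUp parts p hp
    have hpp := hpairs k hk hke
    rw [← hp1, ← hp2] at hpp
    unfold pairPre at hpp
    rcases h1 : PySem.Int.ofStr? p.1 with _ | s
    · rw [h1] at hpp; simp at hpp
    · rcases h2 : PySem.Int.ofStr? p.2 with _ | d
      · rw [h1, h2] at hpp; simp at hpp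
      · rw [h1, h2] at hpp
        simp only [Option.getD_some] at hpp ⊢
        rw [people_eq s d hpp.2.2]
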